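-- pv_equiv track=rewrite | github.com/NahianPolygon/Prime_bot | Prime_bot/streaming_utils.py | iter_text_stream
-- ===== SOURCE A (Python) =====
-- def iter_text_stream(text: str, chunk_chars: int = 24):
--     if not text:
--         return
--
--     words = text.split()
--     if not words:
--         return
--
--     buf = ""
--     for word in words:
--         candidate = word if not buf else f"{buf} {word}"
--         if len(candidate) <= chunk_chars:
--             buf = candidate
--             continue
--         if buf:
--             yield buf + " "
--         buf = word
--
--     if buf:
--         yield buf
-- ===== SOURCE B (Python) =====
-- def iter_text_stream(text: str, chunk_chars: int = 24):
--     # Prefix-sum + index-jump chunking: cum[k] = total length of the first k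
--     # words, each counted with one separating/trailing space.  A chunk starting
--     # at word i is extended by advancing an end index j with O(1) arithmetic
--     # length checks (cum[j+1] - cum[i] - 1 is the joined length of words[i:j+1]);
--     # the chunk text is materialized once per chunk by joining the word slice.
--     words = text.split()
--     if not words:
--         return
--     cum = [0]
--     for w in words:
--         cum.append(cum[-1] + len(w) + 1)
--     n = len(words)
--     pieces = []
--     i = 0
--     while i < n:
--         j = i + 1
--         while j < n and cum[j + 1] - cum[i] - 1 <= chunk_chars:
--             j += 1
--         pieces.append(" ".join(words[i:j]))
--         i = j
--     for p in pieces[:-1]: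
--         yield p + " "
--     yield pieces[-1]
-- ===== Notes on version B (the rewrite author's own statement) =====
-- stated objective: alternative
-- what changed: Replaces A's incremental buffer-and-yield loop (which rebuilds a growing candidate string for every word) by a prefix-sum array of word lengths plus an index-jumping boundary search whose length test is O(1) integer arithmetic, joining each chunk's word slice once.
import Mathlib
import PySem

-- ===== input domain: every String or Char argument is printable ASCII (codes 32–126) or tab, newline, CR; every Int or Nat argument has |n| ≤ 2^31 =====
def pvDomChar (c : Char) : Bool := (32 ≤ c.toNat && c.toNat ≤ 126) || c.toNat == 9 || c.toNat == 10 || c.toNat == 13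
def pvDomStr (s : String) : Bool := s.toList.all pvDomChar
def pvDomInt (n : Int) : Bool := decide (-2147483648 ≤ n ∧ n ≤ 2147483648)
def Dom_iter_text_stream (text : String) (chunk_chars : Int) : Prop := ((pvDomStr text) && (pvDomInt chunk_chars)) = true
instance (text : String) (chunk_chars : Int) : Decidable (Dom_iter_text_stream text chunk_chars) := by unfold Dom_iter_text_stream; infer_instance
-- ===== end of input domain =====

-- B replaces A's incremental buffer-and-yield loop by a prefix-sum array of word lengths
-- plus an index-jumping boundary search (O(1) integer length tests), joining each chunk once.

-- ===== PORT A =====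
-- one iteration of A's loop over the state (buf, yielded-so-far); strings are carried as List Char (exact for Python len/+/split())
def pvStepA (chunk_chars : Int) (st : List Char × List (List Char)) (word : List Char) : List Char × List (List Char) :=
  let candidate := if st.1.isEmpty then word else st.1 ++ [' '] ++ word
  if PySem.Chars.len candidate ≤ chunk_chars then (candidate, st.2)
  else if !st.1.isEmpty then (word, st.2 ++ [st.1 ++ [' ']]) else (word, st.2)

def iter_text_stream (text : String) (chunk_chars : Int) : List String :=
  if text.toList.isEmpty then [] else
  let words := PySem.Chars.split₀ text.toList
  if words.isEmpty then [] else
  let fin := words.foldl (pvStepA chunk_chars) ([], [])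
  (if !fin.1.isEmpty then fin.2 ++ [fin.1] else fin.2).map String.ofList

-- ===== PORT B =====
-- cum = [0]; for w in words: cum.append(cum[-1] + len(w) + 1)
def pvCum (words : List (List Char)) : List Int :=
  words.foldl (fun c w => c ++ [c.getLastD 0 + PySem.Chars.len w + 1]) [0]

-- inner while loop: advance j while j < n and cum[j+1] - cum[i] - 1 <= chunk_chars
-- (cum indexing via getD is exact: every access the loop makes is in range)
def pvJump (cc : Int) (cum : List Int) (n i j : Nat) : Nat :=
  if h : j < n ∧ cum.getD (j + 1) 0 - cum.getD i 0 - 1 ≤ cc then pvJump cc cum n i (j + 1) else j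
termination_by n - j
decreasing_by omega

-- the port's termination needs: the inner loop only moves j forward
lemma pvJump_ge (cc : Int) (cum : List Int) (n i j : Nat) : j ≤ pvJump cc cum n i j := by
  unfold pvJump
  split
  · exact le_trans (by omega) (pvJump_ge cc cum n i (j + 1))
  · exact le_rfl
termination_by n - j
decreasing_by omega

-- outer while loop building pieces; words[i:j] = (drop i).take (j-i), exact for 0 ≤ i ≤ j (PySem.List.slice_natCast)
def pvPieces (cc : Int) (cum : List Int) (words : List (List Char)) (n i : Nat) : List (List Char) :=
  if _h : i < n then
    let j := pvJump cc cum n i (i + 1)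
    PySem.Chars.join [' '] ((words.drop i).take (j - i)) :: pvPieces cc cum words n j
  else []
termination_by n - i
decreasing_by have := pvJump_ge cc cum n i (i + 1); omega

def iter_text_stream_alt (text : String) (chunk_chars : Int) : List String :=
  let words := PySem.Chars.split₀ text.toList
  if words.isEmpty then [] else
  let pieces := pvPieces chunk_chars (pvCum words) words words.length 0
  (pieces.dropLast.map (fun c => c ++ [' ']) ++ [pieces.getLastD []]).map String.ofList

-- ===== PRECONDITION & SPEC =====
def Spec_iter_text_stream (text : String) (chunk_chars : Int) (out : List String) : Prop := out = iter_text_stream_alt text chunk_chars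
instance (text : String) (chunk_chars : Int) (out : List String) : Decidable (Spec_iter_text_stream text chunk_chars out) := by unfold Spec_iter_text_stream; infer_instance

-- ===== CLAIM (what is proved, stated in full; the proofs are below) =====
def Claim_equal_iter_text_stream : Prop := ∀ (text : String) (chunk_chars : Int), Dom_iter_text_stream text chunk_chars → Spec_iter_text_stream text chunk_chars (iter_text_stream text chunk_chars)

-- ===== LEMMAS AND PROOFS =====

-- the common greedy grouping both programs compute, as a structural recursion
def pvG (cc : Int) (buf : List Char) : List (List Char) → List (List Char)
  | [] => [buf]
  | w :: ws =>
    if PySem.Chars.len (buf ++ [' '] ++ w) ≤ cc then pvG cc (buf ++ [' '] ++ w) ws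
    else buf :: pvG cc w ws

-- every word produced by split() is nonempty (loop-level statement)
lemma split_go_ne_nil : ∀ (rest cur : List Char) (acc : List (List Char)),
    (∀ w ∈ acc, w ≠ []) → ∀ w ∈ PySem.Chars.split₀.go rest cur acc, w ≠ [] := by
  intro rest
  induction rest with
  | nil =>
    intro cur acc hacc w hw
    simp only [PySem.Chars.split₀.go] at hw
    split at hw
    · exact hacc w (List.mem_reverse.mp hw)
    · rcases List.mem_cons.mp (List.mem_reverse.mp hw) with h | h
      · subst h; simp_all [List.isEmpty_iff]
      · exact hacc w h
  | cons c rest ih =>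
    intro cur acc hacc w hw
    simp only [PySem.Chars.split₀.go] at hw
    split at hw
    · split at hw
      · exact ih [] acc hacc w hw
      · refine ih [] (cur.reverse :: acc) ?_ w hw
        intro v hv
        rcases List.mem_cons.mp hv with h | h
        · subst h; simp_all [List.isEmpty_iff]
        · exact hacc v h
    · exact ih (c :: cur) acc hacc w hw

lemma split₀_ne_nil (s : List Char) : ∀ w ∈ PySem.Chars.split₀ s, w ≠ [] := by
  intro w hw
  exact split_go_ne_nil s [] [] (by simp) w hw

-- ===== A side: the foldl computes pvG, emitted with a trailing space on all but the last
lemma loopA_eq (cc : Int) : ∀ (rest done : List (List Char)) (buf : List Char),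
    buf ≠ [] → (∀ w ∈ rest, w ≠ []) →
    (let fin := rest.foldl (pvStepA cc) (buf, done.map (fun c => c ++ [' ']));
     if !fin.1.isEmpty then fin.2 ++ [fin.1] else fin.2)
    = (done ++ pvG cc buf rest).dropLast.map (fun c => c ++ [' '])
      ++ [(done ++ pvG cc buf rest).getLastD []] := by
  intro rest
  induction rest with
  | nil =>
    intro done buf hbuf _
    simp [pvG, hbuf]
  | cons word rest ih =>
    intro done buf hbuf hrest
    have hbe : buf.isEmpty = false := by simp [hbuf]
    simp only [List.foldl_cons, pvG]
    have hA : pvStepA cc (buf, done.map (fun c => c ++ [' '])) word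
        = if PySem.Chars.len (buf ++ [' '] ++ word) ≤ cc
          then (buf ++ [' '] ++ word, done.map (fun c => c ++ [' ']))
          else (word, done.map (fun c => c ++ [' ']) ++ [buf ++ [' ']]) := by
      simp [pvStepA, hbe]
    rw [hA]
    by_cases hlen : PySem.Chars.len (buf ++ [' '] ++ word) ≤ cc
    · simp only [if_pos hlen]
      exact ih done (buf ++ [' '] ++ word) (by simp)
        (fun w hw => hrest w (List.mem_cons_of_mem _ hw))
    · simp only [if_neg hlen]
      have := ih (done ++ [buf]) word (hrest word List.mem_cons_self)
        (fun w hw => hrest w (List.mem_cons_of_mem _ hw))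
      simpa using this

-- ===== B side: cum is the scanl of (len + 1), so getD on it is a prefix sum
lemma foldl_snoc_scanl : ∀ (l : List (List Char)) (acc : List Int) (a : Int),
    l.foldl (fun c w => c ++ [c.getLastD 0 + PySem.Chars.len w + 1]) (acc ++ [a])
    = acc ++ l.scanl (fun x w => x + PySem.Chars.len w + 1) a := by
  intro l
  induction l with
  | nil => intro acc a; simp
  | cons w l ih =>
    intro acc a
    simp only [List.foldl_cons, List.scanl_cons]
    rw [List.getLastD_concat, show (acc ++ [a]) ++ [a + PySem.Chars.len w + 1]
        = (acc ++ [a]) ++ [a + PySem.Chars.len w + 1] from rfl]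
    rw [ih (acc ++ [a]) (a + PySem.Chars.len w + 1)]
    simp

-- prefix-sum value of the cum array
def pvP (ws : List (List Char)) (k : Nat) : Int :=
  ((ws.take k).map (fun w => PySem.Chars.len w + 1)).sum

lemma scanl_getD : ∀ (l : List (List Char)) (a : Int) (k : Nat), k ≤ l.length →
    (l.scanl (fun x w => x + PySem.Chars.len w + 1) a).getD k 0
    = a + ((l.take k).map (fun w => PySem.Chars.len w + 1)).sum := by
  intro l
  induction l with
  | nil =>
    intro a k hk
    have hk0 : k = 0 := by simpa using hk
    subst hk0; simp
  | cons w l ih =>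
    intro a k hk
    cases k with
    | zero => simp
    | succ k =>
      simp only [List.scanl_cons, List.getD_cons_succ, List.take_succ_cons, List.map_cons,
        List.sum_cons]
      rw [ih (a + PySem.Chars.len w + 1) k (by simpa using hk)]
      ring

lemma cum_getD (ws : List (List Char)) (k : Nat) (hk : k ≤ ws.length) :
    (pvCum ws).getD k 0 = pvP ws k := by
  have h := foldl_snoc_scanl ws [] 0
  simp only [List.nil_append] at h
  unfold pvCum pvP
  rw [h, scanl_getD ws 0 k hk]
  ring

-- length of " ".join of a nonempty list of words
lemma len_join (l : List (List Char)) (h : l ≠ []) :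
    PySem.Chars.len (PySem.Chars.join [' '] l)
    = (l.map (fun w => PySem.Chars.len w + 1)).sum - 1 := by
  induction l with
  | nil => exact absurd rfl h
  | cons x l ih =>
    cases l with
    | nil => simp [PySem.Chars.join_singleton]
    | cons y t =>
      rw [PySem.Chars.join_cons_cons]
      have := ih (by simp)
      simp only [List.map_cons, List.sum_cons, PySem.Chars.len_eq] at *
      simp only [List.length_append, List.length_singleton]
      push_cast
      omega

-- the slice sum telescopes against the prefix sums
lemma sum_slice (ws : List (List Char)) (i j : Nat) (hij : i ≤ j) :
    (((ws.drop i).take (j - i)).map (fun w => PySem.Chars.len w + 1)).sum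
    = pvP ws j - pvP ws i := by
  unfold pvP
  have h : ws.take j = ws.take i ++ (ws.drop i).take (j - i) := by
    conv_lhs => rw [← List.take_append_drop i (ws.take j)]
    congr 1
    · rw [List.take_take]; congr 1; omega
    · rw [List.drop_take]
  rw [h]
  simp

-- the slice words[i:j+1] extends words[i:j] by word j
lemma slice_succ (ws : List (List Char)) (i j : Nat) (hij : i ≤ j) (hj : j < ws.length) :
    (ws.drop i).take (j + 1 - i) = (ws.drop i).take (j - i) ++ [ws[j]] := by
  have h1 : j - i < (ws.drop i).length := by simp; omega
  have h2 : (ws.drop i)[j - i] = ws[j] := by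
    rw [List.getElem_drop]
    congr 1; omega
  rw [show j + 1 - i = (j - i) + 1 by omega, List.take_add_one,
    List.getElem?_eq_getElem h1, h2]
  rfl

-- join over a snoc of a nonempty list
lemma join_snoc (l : List (List Char)) (x : List Char) (h : l ≠ []) :
    PySem.Chars.join [' '] (l ++ [x]) = PySem.Chars.join [' '] l ++ [' '] ++ x := by
  induction l with
  | nil => exact absurd rfl h
  | cons a l ih =>
    cases l with
    | nil => simp [PySem.Chars.join_cons_cons, PySem.Chars.join_singleton]
    | cons b t =>
      simp only [List.cons_append] at ih ⊢
      rw [PySem.Chars.join_cons_cons, PySem.Chars.join_cons_cons, ih (by simp)]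
      simp

-- slice of a single word
lemma slice_one (ws : List (List Char)) (i : Nat) (hi : i < ws.length) :
    (ws.drop i).take 1 = [ws[i]] := by
  rw [List.drop_eq_getElem_cons hi]
  simp only [List.take_succ_cons, List.take_zero]

-- the inner jump + the outer piece loop compute pvG
lemma inner_eq (cc : Int) (ws : List (List Char)) : ∀ (j i : Nat), i < j → j ≤ ws.length →
    pvG cc (PySem.Chars.join [' '] ((ws.drop i).take (j - i))) (ws.drop j)
    = PySem.Chars.join [' ']
        ((ws.drop i).take (pvJump cc (pvCum ws) ws.length i j - i))
      :: pvPieces cc (pvCum ws) ws ws.length (pvJump cc (pvCum ws) ws.length i j) := by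
  intro j i hij hj
  have hslice_ne : (ws.drop i).take (j - i) ≠ [] := by
    have : ((ws.drop i).take (j - i)).length = min (j - i) (ws.length - i) := by simp
    intro hnil
    rw [hnil] at this
    simp at this
    omega
  rw [pvJump]
  by_cases hc : j < ws.length ∧ (pvCum ws).getD (j + 1) 0 - (pvCum ws).getD i 0 - 1 ≤ cc
  · rw [dif_pos hc]
    obtain ⟨hjn, hcond⟩ := hc
    -- translate the arithmetic condition into a join-length condition
    have harith : (pvCum ws).getD (j + 1) 0 - (pvCum ws).getD i 0 - 1
        = PySem.Chars.len (PySem.Chars.join [' '] ((ws.drop i).take (j + 1 - i))) := by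
      rw [cum_getD ws (j + 1) (by omega), cum_getD ws i (by omega),
        len_join _ (by
          have : ((ws.drop i).take (j + 1 - i)).length = min (j + 1 - i) (ws.length - i) := by simp
          intro hnil; rw [hnil] at this; simp at this; omega),
        sum_slice ws i (j + 1) (by omega)]
    have hdropj : ws.drop j = ws[j] :: ws.drop (j + 1) :=
      List.drop_eq_getElem_cons hjn
    have hsl : (ws.drop i).take (j + 1 - i) = (ws.drop i).take (j - i) ++ [ws[j]] :=
      slice_succ ws i j (by omega) hjn
    have hjoin : PySem.Chars.join [' '] ((ws.drop i).take (j + 1 - i))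
        = PySem.Chars.join [' '] ((ws.drop i).take (j - i)) ++ [' '] ++ ws[j] := by
      rw [hsl, join_snoc _ _ hslice_ne]
    rw [hdropj]
    simp only [pvG]
    rw [if_pos (by rw [← hjoin, ← harith]; exact hcond), ← hjoin]
    exact inner_eq cc ws (j + 1) i (by omega) (by omega)
  · rw [dif_neg hc]
    rcases Nat.lt_or_ge j ws.length with hjn | hjn
    · -- j < n but the length test failed: close the chunk, open a new one at j
      have hdropj : ws.drop j = ws[j] :: ws.drop (j + 1) :=
        List.drop_eq_getElem_cons hjn
      have hcond : ¬ (pvCum ws).getD (j + 1) 0 - (pvCum ws).getD i 0 - 1 ≤ cc := by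
        intro h; exact hc ⟨hjn, h⟩
      have harith : (pvCum ws).getD (j + 1) 0 - (pvCum ws).getD i 0 - 1
          = PySem.Chars.len (PySem.Chars.join [' '] ((ws.drop i).take (j + 1 - i))) := by
        rw [cum_getD ws (j + 1) (by omega), cum_getD ws i (by omega),
          len_join _ (by
            have : ((ws.drop i).take (j + 1 - i)).length = min (j + 1 - i) (ws.length - i) := by simp
            intro hnil; rw [hnil] at this; simp at this; omega),
          sum_slice ws i (j + 1) (by omega)]
      have hsl : (ws.drop i).take (j + 1 - i) = (ws.drop i).take (j - i) ++ [ws[j]] :=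
        slice_succ ws i j (by omega) hjn
      have hjoin : PySem.Chars.join [' '] ((ws.drop i).take (j + 1 - i))
          = PySem.Chars.join [' '] ((ws.drop i).take (j - i)) ++ [' '] ++ ws[j] := by
        rw [hsl, join_snoc _ _ hslice_ne]
      rw [hdropj]
      simp only [pvG]
      rw [if_neg (by rw [← hjoin, ← harith]; exact hcond)]
      congr 1
      -- the tail chunks from j are pvPieces at j
      rw [pvPieces, dif_pos hjn]
      have := inner_eq cc ws (j + 1) j (by omega) (by omega)
      have h11 : j + 1 - j = 1 := by omega
      rw [h11, slice_one ws j hjn, PySem.Chars.join_singleton] at this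
      exact this
    · -- j = n: last chunk
      have hjn' : j = ws.length := by omega
      rw [hjn', List.drop_length]
      simp only [pvG]
      rw [pvPieces, dif_neg (by omega)]
  termination_by j => ws.length - j

lemma pieces_eq (cc : Int) (w : List Char) (rest : List (List Char)) :
    pvPieces cc (pvCum (w :: rest)) (w :: rest) (w :: rest).length 0 = pvG cc w rest := by
  have h0 : 0 < (w :: rest).length := by simp
  rw [pvPieces, dif_pos h0]
  have h := inner_eq cc (w :: rest) 1 0 (by omega) (by omega)
  simp only [Nat.sub_zero] at h ⊢
  rw [slice_one (w :: rest) 0 h0, PySem.Chars.join_singleton] at h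
  simp only [List.drop_zero] at h ⊢
  exact h.symm

lemma ports_eq (text : String) (cc : Int) :
    iter_text_stream text cc = iter_text_stream_alt text cc := by
  unfold iter_text_stream iter_text_stream_alt
  cases h : PySem.Chars.split₀ text.toList with
  | nil => split_ifs <;> simp
  | cons w rest =>
    have htext : text.toList.isEmpty = false := by
      cases htl : text.toList with
      | nil => rw [htl] at h; simp [PySem.Chars.split₀] at h; cases h
      | cons a l => rfl
    have hw : w ≠ [] := split₀_ne_nil _ w (h ▸ List.mem_cons_self)
    have hrest : ∀ v ∈ rest, v ≠ [] := fun v hv => split₀_ne_nil _ v (h ▸ List.mem_cons_of_mem _ hv)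
    have hstep1 : pvStepA cc ([], []) w = (w, []) := by
      simp [pvStepA]
    simp only [htext, Bool.false_eq_true, if_false, List.isEmpty_cons, List.foldl_cons, hstep1]
    have hA := loopA_eq cc rest [] w hw hrest
    simp only [List.map_nil, List.nil_append] at hA
    rw [hA, pieces_eq cc w rest]

-- ===== VERDICT (by name: the statement is the Claim_ definition above) =====
theorem iter_text_stream_spec : Claim_equal_iter_text_stream := by
  intro text cc _
  exact ports_eq text cc
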